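-- pv_equiv track=rewrite | github.com/yj-melissa/solved | 프로그래머스/lv2/12973. 짝지어 제거하기/짝지어 제거하기.py | solution
-- ===== SOURCE A (Python) =====
-- def solution(s):
--     stack = []
--
--     for a in s:
--         if stack and stack[-1] == a:        # 스택 맨 위에 있는 알파벳과 같으면 pop
--                 stack.pop()
--         else:
--             stack.append(a)
--     if stack:
--         return 0
--     return 1
-- ===== SOURCE B (Python) =====
-- def solution(s):
--     cur = s
--     while True:
--         out = []
--         changed = False
--         i = 0
--         while i < len(cur):
--             if i + 1 < len(cur) and cur[i] == cur[i + 1]: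
--                 i += 2
--                 changed = True
--             else:
--                 out.append(cur[i])
--                 i += 1
--         cur = ''.join(out)
--         if not changed:
--             break
--     return 1 if not cur else 0
-- ===== Notes on version B (the rewrite author's own statement) =====
-- stated objective: alternative
-- what changed: Replaces the single stack pass with repeated whole-string passes that drop disjoint adjacent equal pairs until a fixpoint, returning 1 iff the fixpoint is empty (correct by confluence of pair removal).
import Mathlib
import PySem

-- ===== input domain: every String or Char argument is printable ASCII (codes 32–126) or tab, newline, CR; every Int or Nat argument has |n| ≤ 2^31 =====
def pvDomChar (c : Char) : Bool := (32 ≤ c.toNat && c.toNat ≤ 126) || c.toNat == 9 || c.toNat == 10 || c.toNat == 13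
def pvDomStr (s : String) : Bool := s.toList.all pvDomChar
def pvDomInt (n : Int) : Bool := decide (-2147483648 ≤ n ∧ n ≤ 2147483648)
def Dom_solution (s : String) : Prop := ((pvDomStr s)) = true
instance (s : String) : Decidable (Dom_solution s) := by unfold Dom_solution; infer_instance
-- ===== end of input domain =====

-- B replaces A's single stack pass by repeated whole-string passes removing disjoint
-- adjacent equal pairs until a fixpoint (same result by confluence of pair removal); not faster.

-- ===== PORT A =====
-- stack kept top-first (head = Python stack[-1]); append/pop become cons/tail
def solStep (st : List Char) (a : Char) : List Char :=
  match st with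
  | b :: rest => if b = a then rest else a :: b :: rest
  | [] => [a]

def solution (s : String) : Int :=
  let stack := s.toList.foldl solStep []
  if stack = [] then 1 else 0

-- ===== PORT B =====
-- one left-to-right pass: keep chars, skipping each adjacent equal pair; flag = any removal
def onePass : List Char → List Char × Bool
  | [] => ([], false)
  | [a] => ([a], false)
  | a :: b :: t =>
    if a = b then ((onePass t).1, true)
    else
      let p := onePass (b :: t)
      (a :: p.1, p.2)

theorem onePass_len (w : List Char) :
    (onePass w).1.length + (cond (onePass w).2 2 0) ≤ w.length := by
  fun_induction onePass w with
  | case1 => simp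
  | case2 => simp
  | case3 a t ih => cases hb : (onePass t).2 <;> simp [hb] at ih ⊢ <;> omega
  | case4 a b t _h p ih => cases hb : (onePass (b :: t)).2 <;> simp [hb, p] at ih ⊢ <;> omega

def reduceLoop (w : List Char) : List Char :=
  if h : (onePass w).2 then reduceLoop (onePass w).1 else w
  termination_by w.length
  decreasing_by
    have := onePass_len w
    simp_all
    omega

def solution_alt (s : String) : Int :=
  let r := reduceLoop s.toList
  if r = [] then 1 else 0

-- ===== PRECONDITION & SPEC =====
def Spec_solution (s : String) (out : Int) : Prop := out = solution_alt s
instance (s : String) (out : Int) : Decidable (Spec_solution s out) := by unfold Spec_solution; infer_instance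

-- ===== CLAIM (what is proved, stated in full; the proofs are below) =====
def Claim_equal_solution : Prop := ∀ (s : String), Dom_solution s → Spec_solution s (solution s)

-- ===== LEMMAS AND PROOFS =====

-- the stack never holds two adjacent equal chars
theorem chainTail (b : Char) (rest : List Char)
    (h : List.IsChain (fun x y : Char => x ≠ y) (b :: rest)) :
    List.IsChain (fun x y : Char => x ≠ y) rest := by
  cases rest with
  | nil => simp
  | cons c r => exact (List.isChain_cons_cons.mp h).2

theorem solStep_chain (st : List Char) (a : Char)
    (h : List.IsChain (fun x y => x ≠ y) st) :
    List.IsChain (fun x y => x ≠ y) (solStep st a) := by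
  cases st with
  | nil => simp [solStep]
  | cons b rest =>
    by_cases hb : b = a
    · simp only [solStep, if_pos hb]; exact chainTail b rest h
    · simpa [solStep, hb] using List.isChain_cons_cons.mpr ⟨Ne.symm hb, h⟩

-- popping twice the same char is the identity on invariant stacks
theorem solStep_twice (st : List Char) (a : Char)
    (h : List.IsChain (fun x y => x ≠ y) st) :
    solStep (solStep st a) a = st := by
  cases st with
  | nil => simp [solStep]
  | cons b rest =>
    by_cases hb : b = a
    · subst hb
      cases rest with
      | nil => simp [solStep]
      | cons c r =>
        have hc : b ≠ c := (List.isChain_cons_cons.mp h).1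
        simp [solStep, Ne.symm hc]
    · simp [solStep, hb]

-- one pass does not change the stack result
theorem foldl_onePass (w : List Char) :
    ∀ st, List.IsChain (fun x y => x ≠ y) st →
      (onePass w).1.foldl solStep st = w.foldl solStep st := by
  fun_induction onePass w with
  | case1 => intro st _; rfl
  | case2 a => intro st _; rfl
  | case3 a t ih =>
    intro st hst
    simp only [List.foldl_cons]
    rw [ih st hst, solStep_twice st a hst]
  | case4 a b t h p ih =>
    intro st hst
    simp only [p, List.foldl_cons]
    exact ih (solStep st a) (solStep_chain st a hst)

-- an unchanged pass means no adjacent equal pair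
theorem onePass_false_chain (w : List Char) (h : (onePass w).2 = false) :
    List.IsChain (fun x y => x ≠ y) w := by
  fun_induction onePass w with
  | case1 => simp
  | case2 a => simp
  | case3 a t ih => simp at h
  | case4 a b t hab p ih =>
    simp only [p] at h
    exact List.isChain_cons_cons.mpr ⟨hab, ih h⟩

-- on an irreducible word the stack just accumulates everything
theorem foldl_irred (w : List Char) :
    ∀ st, List.IsChain (fun x y => x ≠ y) w →
      (∀ a b, w.head? = some a → st.head? = some b → b ≠ a) →
      w.foldl solStep st = w.reverse ++ st := by
  induction w with
  | nil => intro st _ _; simp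
  | cons a t ih =>
    intro st hch hhd
    have hpush : solStep st a = a :: st := by
      cases st with
      | nil => rfl
      | cons b r =>
        have : b ≠ a := hhd a b rfl rfl
        simp [solStep, this]
    simp only [List.foldl_cons, hpush]
    rw [ih (a :: st) (chainTail a t hch)]
    · simp
    · intro c b hc hb
      cases t with
      | nil => simp at hc
      | cons d r =>
        simp at hc hb
        subst hc; subst hb
        exact (List.isChain_cons_cons.mp hch).1

theorem reduceLoop_stack (w : List Char) :
    (reduceLoop w).foldl solStep [] = w.foldl solStep [] ∧
      (onePass (reduceLoop w)).2 = false := by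
  rw [reduceLoop]
  split
  case isTrue h =>
    have ih := reduceLoop_stack (onePass w).1
    exact ⟨ih.1.trans (foldl_onePass w [] (by simp)), ih.2⟩
  case isFalse h => exact ⟨rfl, by simpa using h⟩
  termination_by w.length
  decreasing_by
    have := onePass_len w
    simp_all
    omega

theorem stack_eq_reverse (w : List Char) :
    (reduceLoop w).reverse = w.foldl solStep [] := by
  obtain ⟨h1, h2⟩ := reduceLoop_stack w
  rw [← h1]
  have := foldl_irred (reduceLoop w) [] (onePass_false_chain _ h2) (by simp)
  simp [this]

-- ===== VERDICT (by name: the statement is the Claim_ definition above) =====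
theorem solution_spec : Claim_equal_solution := by
  intro s _
  unfold Spec_solution solution solution_alt
  rw [← stack_eq_reverse s.toList]
  simp
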